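-- pv_equiv track=rewrite | github.com/FlaviaTironi/EP2-Yacht-Dice | funcoes.py | calcula_pontos_quina
-- ===== SOURCE A (Python) =====
-- def calcula_pontos_quina(dados):
--     repetições = {}
--     soma = 0
--
--     for d in dados:
--         if d in repetições:
--             repetições[d] += 1
--         else:
--             repetições[d] = 1
--
--     cinco = False
--     for valor in repetições.values():
--         if valor >= 5:
--             cinco = True
--
--     if cinco:
--         resultado = 50
--     else:
--         resultado = 0
--
--     return resultado
-- ===== SOURCE B (Python) =====
-- def calcula_pontos_quina(dados):
--     # sort a copy, then detect a run of 5 equal consecutive values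
--     run = 0
--     prev = None
--     for x in sorted(dados):
--         run = run + 1 if prev is not None and x == prev else 1
--         if run >= 5:
--             return 50
--         prev = x
--     return 0
-- ===== Notes on version B (the rewrite author's own statement) =====
-- stated objective: alternative
-- what changed: Replaces the frequency-dictionary pass plus values scan with sort-then-linear run detection (early return at the first run of length 5).
import Mathlib
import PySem

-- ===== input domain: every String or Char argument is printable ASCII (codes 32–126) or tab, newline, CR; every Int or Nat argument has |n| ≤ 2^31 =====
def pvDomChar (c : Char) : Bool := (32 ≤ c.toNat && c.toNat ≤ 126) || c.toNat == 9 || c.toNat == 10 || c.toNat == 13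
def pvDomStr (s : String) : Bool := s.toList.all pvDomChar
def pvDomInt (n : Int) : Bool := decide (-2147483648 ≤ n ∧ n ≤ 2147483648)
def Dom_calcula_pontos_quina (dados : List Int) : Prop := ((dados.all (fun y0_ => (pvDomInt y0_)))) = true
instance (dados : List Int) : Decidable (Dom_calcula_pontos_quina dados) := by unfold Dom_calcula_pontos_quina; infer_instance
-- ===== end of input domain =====

-- B replaces A's frequency-dictionary + values scan with sort-then-linear run detection (alternative algorithm, similar cost).


-- ===== PORT A =====
def calcula_pontos_quina (dados : List Int) : Int :=
  let repetições : PySem.Dict Int Int :=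
    dados.foldl
      (fun d x => if d.contains x then d.insert x (d.getD x 0 + 1) else d.insert x 1)
      PySem.Dict.empty
  let cinco : Bool :=
    repetições.values.foldl (fun c v => if 5 ≤ v then true else c) false
  if cinco then 50 else 0

-- ===== PORT B =====
-- walk the sorted list carrying (prev, run); early return 50 on a run of 5
def pvRunScan : List Int → Option Int → Int → Int
  | [], _, _ => 0
  | x :: xs, prev, run =>
    let r : Int := if prev = some x then run + 1 else 1
    if 5 ≤ r then 50 else pvRunScan xs (some x) r

def calcula_pontos_quina_alt (dados : List Int) : Int :=
  pvRunScan (PySem.List.sorted dados (fun y => y) false) none 0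

-- ===== PRECONDITION & SPEC =====
def Spec_calcula_pontos_quina (dados : List Int) (out : Int) : Prop := out = calcula_pontos_quina_alt dados
instance (dados : List Int) (out : Int) : Decidable (Spec_calcula_pontos_quina dados out) := by unfold Spec_calcula_pontos_quina; infer_instance

-- ===== CLAIM (what is proved, stated in full; the proofs are below) =====
def Claim_equal_calcula_pontos_quina : Prop := ∀ (dados : List Int), Dom_calcula_pontos_quina dados → Spec_calcula_pontos_quina dados (calcula_pontos_quina dados)

-- ===== LEMMAS AND PROOFS =====

-- the common normal form: 50 iff some element occurs at least 5 times
def pvHasQuint (dados : List Int) : Bool := dados.any (fun x => 5 ≤ dados.count x)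

-- length of the leading block of p's
def pvLead (p : Int) (l : List Int) : Nat := (l.takeWhile (fun y => y == p)).length

theorem pvLead_cons_self (p : Int) (l : List Int) : pvLead p (p :: l) = pvLead p l + 1 := by
  simp [pvLead, List.takeWhile]
theorem pvLead_cons_ne (p x : Int) (l : List Int) (h : x ≠ p) : pvLead p (x :: l) = 0 := by
  simp [pvLead, List.takeWhile_cons, h]

theorem pvCount_eq_lead (p : Int) (l : List Int) (hs : l.Pairwise (· ≤ ·))
    (hge : ∀ y ∈ l, p ≤ y) : l.count p = pvLead p l := by
  induction l with
  | nil => simp [pvLead]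
  | cons x xs ih =>
    rcases List.pairwise_cons.mp hs with ⟨hx, hxs⟩
    by_cases hxp : x = p
    · subst hxp
      rw [List.count_cons_self, pvLead_cons_self, ih hxs (fun y hy => hge y (List.mem_cons_of_mem _ hy))]
    · have hlt : p < x := lt_of_le_of_ne (hge x (List.mem_cons_self)) (fun h => hxp h.symm)
      rw [pvLead_cons_ne p x xs hxp]
      have h0 : xs.count p = 0 := by
        apply List.count_eq_zero_of_not_mem
        intro hmem
        exact absurd (lt_of_lt_of_le hlt (hx p hmem)) (lt_irrefl p)
      rw [List.count_cons_of_ne hxp, h0]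

-- main invariant for the run scan on a sorted tail
theorem pvRunScan_spec (l : List Int) (hs : l.Pairwise (· ≤ ·)) (p : Int) (r : Int)
    (hge : ∀ y ∈ l, p ≤ y) (hr1 : 1 ≤ r) (hr4 : r ≤ 4) :
    pvRunScan l (some p) r = 50 ↔
      (5 ≤ r + (pvLead p l : Int) ∨ ∃ x ∈ l, 5 ≤ l.count x) := by
  induction l generalizing p r with
  | nil => simp [pvRunScan, pvLead]; omega
  | cons x xs ih =>
    rcases List.pairwise_cons.mp hs with ⟨hx, hxs⟩
    have hgx : ∀ y ∈ xs, x ≤ y := hx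
    by_cases hxp : x = p
    · subst hxp
      rw [pvLead_cons_self]
      by_cases h5 : (5 : Int) ≤ r + 1
      · have : pvRunScan (x :: xs) (some x) r = 50 := by
          simp [pvRunScan, h5]
        constructor
        · intro _; left; push_cast; omega
        · intro _; exact this
      · have hstep : pvRunScan (x :: xs) (some x) r = pvRunScan xs (some x) (r + 1) := by
          simp [pvRunScan, h5]
        rw [hstep, ih hxs x (r + 1) hgx (by omega) (by omega)]
        have hcx : xs.count x = pvLead x xs := pvCount_eq_lead x xs hxs hgx
        constructor
        · rintro (hrun | ⟨y, hy, hcy⟩)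
          · left; push_cast at hrun ⊢; omega
          · by_cases hyx : y = x
            · subst hyx; left; push_cast; omega
            · right; exact ⟨y, List.mem_cons_of_mem _ hy,
                by rwa [List.count_cons_of_ne (fun h => hyx h.symm)]⟩
        · rintro (hrun | ⟨y, hy, hcy⟩)
          · left; push_cast at hrun ⊢; omega
          · rcases List.mem_cons.mp hy with hyx | hyxs
            · subst hyx
              rw [List.count_cons_self] at hcy
              left; push_cast; omega
            · by_cases hyx : y = x
              · subst hyx; left; rw [List.count_cons_self] at hcy; push_cast; omega
              · right; rw [List.count_cons_of_ne (fun h => hyx h.symm)] at hcy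
                exact ⟨y, hyxs, hcy⟩
    · have hne : ¬ (some p = some x) := fun h => hxp (Option.some.inj h).symm
      have hstep : pvRunScan (x :: xs) (some p) r = pvRunScan xs (some x) 1 := by
        simp [pvRunScan, hne]
      rw [hstep, ih hxs x 1 hgx (by omega) (by omega),
          pvLead_cons_ne p x xs hxp]
      have hcx : xs.count x = pvLead x xs := pvCount_eq_lead x xs hxs hgx
      constructor
      · rintro (hrun | ⟨y, hy, hcy⟩)
        · right; exact ⟨x, List.mem_cons_self, by rw [List.count_cons_self]; push_cast at hrun; omega⟩
        · by_cases hyx : y = x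
          · right
            rw [hyx] at hcy
            exact ⟨x, List.mem_cons_self, by rw [List.count_cons_self]; omega⟩
          · right; exact ⟨y, List.mem_cons_of_mem _ hy,
              by rwa [List.count_cons_of_ne (fun h => hyx h.symm)]⟩
      · rintro (hrun | ⟨y, hy, hcy⟩)
        · simp at hrun; omega
        · rcases List.mem_cons.mp hy with hyx | hyxs
          · subst hyx; rw [List.count_cons_self] at hcy; left; push_cast; omega
          · by_cases hyx : y = x
            · subst hyx; rw [List.count_cons_self] at hcy; left; push_cast; omega
            · right; rw [List.count_cons_of_ne (fun h => hyx h.symm)] at hcy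
              exact ⟨y, hyxs, hcy⟩

theorem pvRunScan_cases (l : List Int) (p : Option Int) (r : Int) :
    pvRunScan l p r = 50 ∨ pvRunScan l p r = 0 := by
  induction l generalizing p r with
  | nil => right; rfl
  | cons x xs ih =>
    by_cases h : (5 : Int) ≤ (if p = some x then r + 1 else 1)
    · left; simp [pvRunScan, h]
    · have : pvRunScan (x :: xs) p r = pvRunScan xs (some x) (if p = some x then r + 1 else 1) := by
        simp [pvRunScan, h]
      rw [this]; exact ih _ _

theorem pvAlt_eq (dados : List Int) :
    calcula_pontos_quina_alt dados = if pvHasQuint dados then 50 else 0 := by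
  unfold calcula_pontos_quina_alt
  have hperm : (PySem.List.sorted dados (fun y => y) false).Perm dados :=
    PySem.List.sorted_perm dados (fun y => y) false
  have hsorted : (PySem.List.sorted dados (fun y => y) false).Pairwise (· ≤ ·) := by
    simpa using PySem.List.sorted_pairwise dados (fun y => y)
  have hquint : pvHasQuint dados = true ↔ ∃ x ∈ dados, 5 ≤ dados.count x := by
    simp [pvHasQuint]
  rcases hsl : PySem.List.sorted dados (fun y => y) false with _ | ⟨m, t⟩
  · rw [hsl] at hperm
    have hnil : dados = [] := hperm.symm.eq_nil
    subst hnil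
    simp [pvRunScan, pvHasQuint]
  · rw [hsl] at hperm hsorted
    rcases List.pairwise_cons.mp hsorted with ⟨hm, ht⟩
    have ht' : List.Pairwise (· ≤ ·) t := ht
    have hcount : ∀ x, (m :: t).count x = dados.count x := fun x => hperm.count_eq x
    have hstep : pvRunScan (m :: t) none 0 = pvRunScan t (some m) 1 := by
      simp [pvRunScan]
    rw [hstep]
    have hspec := pvRunScan_spec t ht' m 1 hm (by omega) (by omega)
    by_cases hq : pvHasQuint dados = true
    · rw [if_pos hq]
      rcases hquint.mp hq with ⟨x, hxmem, hxc⟩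
      have hxm : x ∈ m :: t := hperm.mem_iff.mpr hxmem
      have hxc' : 5 ≤ (m :: t).count x := by rw [hcount]; exact hxc
      apply hspec.mpr
      by_cases hxm2 : x = m
      · subst hxm2
        left
        rw [List.count_cons_self] at hxc'
        have hcm : t.count x = pvLead x t := pvCount_eq_lead x t ht' hm
        push_cast; omega
      · right
        rcases List.mem_cons.mp hxm with h | h
        · exact absurd h hxm2
        · rw [List.count_cons_of_ne (fun h2 => hxm2 h2.symm)] at hxc'
          exact ⟨x, h, hxc'⟩
    · rw [if_neg hq]
      rcases pvRunScan_cases t (some m) 1 with h50 | h0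
      · exfalso
        apply hq
        apply hquint.mpr
        rcases hspec.mp h50 with hrun | ⟨y, hy, hcy⟩
        · refine ⟨m, hperm.mem_iff.mp List.mem_cons_self, ?_⟩
          rw [← hcount m, List.count_cons_self]
          have hcm : t.count m = pvLead m t := pvCount_eq_lead m t ht' hm
          push_cast at hrun; omega
        · refine ⟨y, hperm.mem_iff.mp (List.mem_cons_of_mem _ hy), ?_⟩
          rw [← hcount y]
          calc 5 ≤ t.count y := hcy
            _ ≤ (m :: t).count y := by rw [List.count_cons]; omega
      · exact h0

-- A-side: the branching counter loop is the Counter loop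
theorem pvCounterLoop_eq (dados : List Int) :
    dados.foldl
      (fun d x => if d.contains x then d.insert x (d.getD x 0 + 1) else d.insert x 1)
      PySem.Dict.empty = PySem.Dict.counter dados := by
  rw [← PySem.Dict.foldl_insert_getD_add_one_eq_counter]
  congr 1
  funext d x
  by_cases h : d.contains x = true
  · simp [h]
  · have hget : d.getD x 0 = 0 := by
      have : d.get? x = none := by
        rw [PySem.Dict.get?_eq_none_iff_contains]
        simpa using h
      simp [PySem.Dict.getD, this]
    simp [h, hget]

theorem pvOrFold (l : List Int) (b : Bool) :
    l.foldl (fun c v => if 5 ≤ v then true else c) b = (b || l.any (fun v => 5 ≤ v)) := by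
  induction l generalizing b with
  | nil => simp
  | cons x xs ih =>
    rw [List.foldl_cons, ih]
    by_cases h : (5 : Int) ≤ x
    · simp [h]
    · simp [h]

theorem pvA_eq (dados : List Int) :
    calcula_pontos_quina dados = if pvHasQuint dados then 50 else 0 := by
  unfold calcula_pontos_quina
  rw [pvCounterLoop_eq]
  simp only [pvOrFold, Bool.false_or]
  have hvals : (PySem.Dict.counter dados).values
      = (PySem.Set.ofList dados).map (fun k => (dados.count k : Int)) := by
    show (PySem.Dict.counter dados).items.map (·.2) = _
    rw [PySem.Dict.items_counter]
    simp
  simp only [hvals]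
  have : ((PySem.Set.ofList dados).map (fun k => (dados.count k : Int))).any (fun v => 5 ≤ v)
      = pvHasQuint dados := by
    simp only [List.any_map, pvHasQuint]
    rcases h : dados.any (fun x => 5 ≤ dados.count x) with _ | _
    · simp only [List.any_eq_false] at h ⊢
      intro x hx
      have hxd : x ∈ dados := (PySem.Set.mem_ofList _ _).mp hx
      have := h x hxd
      simpa using this
    · simp only [List.any_eq_true] at h ⊢
      rcases h with ⟨x, hx, hc⟩
      refine ⟨x, (PySem.Set.mem_ofList _ _).mpr hx, ?_⟩
      simpa using hc
  simp only [this]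

-- ===== VERDICT (by name: the statement is the Claim_ definition above) =====
theorem calcula_pontos_quina_spec : Claim_equal_calcula_pontos_quina := by
  intro dados _
  show calcula_pontos_quina dados = calcula_pontos_quina_alt dados
  rw [pvA_eq, pvAlt_eq]
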